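-- pv_equiv track=rewrite | github.com/larry311012/ai-news-hub | backend/scripts/batch_fix_user_ids.py | add_test_user_to_params
-- ===== SOURCE A (Python) =====
-- def add_test_user_to_params(content):
--     """Add test_user to function parameters if not present"""
--     lines = content.split('\n')
--     result = []
--
--     for i, line in enumerate(lines):
--         # Check if this is a fixture or test method that might need test_user
--         if 'def ' in line and '(db_session' in line and 'test_user' not in line:
--             # Look ahead to see if this function uses test_user.id
--             next_20_lines = '\n'.join(lines[i:min(i+20, len(lines))])
--             if 'test_user.id' in next_20_lines:
--                 # Add test_user parameter
--                 line = line.replace('(db_session)', '(db_session, test_user)')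
--                 line = line.replace('(db_session,', '(db_session, test_user,')
--
--         result.append(line)
--
--     return '\n'.join(result)
-- ===== SOURCE B (Python) =====
-- def add_test_user_to_params(content):
--     """Add test_user to function parameters if not present.
--
--     Single backward pass: carry the index of the nearest following line
--     containing 'test_user.id' instead of joining a 20-line window per
--     candidate; output is built back-to-front and reversed once.
--     """
--     lines = content.split('\n')
--     n = len(lines)
--     out = []
--     nh = n  # index of nearest line at/after current one containing 'test_user.id', n if none
--     for i, line in reversed(list(enumerate(lines))):
--         if 'test_user.id' in line:
--             nh = i
--         if ('def ' in line and '(db_session' in line and 'test_user' not in line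
--                 and nh < n and nh < i + 20):
--             line = line.replace('(db_session)', '(db_session, test_user)')
--             line = line.replace('(db_session,', '(db_session, test_user,')
--         out.append(line)
--     out.reverse()
--     return '\n'.join(out)
-- ===== Notes on version B (the rewrite author's own statement) =====
-- stated objective: alternative
-- what changed: Replaces A's per-candidate 20-line join-and-substring-search lookahead with a single backward pass that carries the index of the nearest following 'test_user.id' line and builds the output back-to-front, keeping the candidate test and replacement block unchanged.
import Mathlib
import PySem

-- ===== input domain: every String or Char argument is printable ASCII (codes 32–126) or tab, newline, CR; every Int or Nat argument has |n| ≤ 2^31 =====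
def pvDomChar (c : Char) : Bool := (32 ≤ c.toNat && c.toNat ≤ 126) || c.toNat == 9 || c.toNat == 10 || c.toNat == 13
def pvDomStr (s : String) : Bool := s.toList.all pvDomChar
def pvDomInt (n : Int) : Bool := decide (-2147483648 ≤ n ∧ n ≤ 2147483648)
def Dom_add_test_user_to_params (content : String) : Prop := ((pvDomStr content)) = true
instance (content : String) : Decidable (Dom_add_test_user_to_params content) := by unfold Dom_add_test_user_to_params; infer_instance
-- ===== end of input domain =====

-- B replaces A's per-candidate 20-line join-and-search lookahead by one backward pass carrying
-- the nearest following 'test_user.id' line index, building the output back-to-front (alternative).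

-- ===== PORT A =====
-- loop body of A: for each (i, line), possibly add the test_user parameter after joining the 20-line window
def pvLineA (lines : List (List Char)) (p : Int × List Char) : List Char :=
  let i := p.1
  let line := p.2
  if PySem.Chars.isIn "def ".toList line && PySem.Chars.isIn "(db_session".toList line
      && !PySem.Chars.isIn "test_user".toList line then
    let next20 := PySem.Chars.join ['\n']
      (PySem.List.slice lines (some i) (some (min (i + 20) (lines.length : Int))))
    if PySem.Chars.isIn "test_user.id".toList next20 then
      PySem.Chars.replace
        (PySem.Chars.replace line "(db_session)".toList "(db_session, test_user)".toList)
        "(db_session,".toList "(db_session, test_user,".toList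
    else line
  else line

def add_test_user_to_params (content : String) : String :=
  let lines := PySem.Chars.splitOn content.toList ['\n']
  let result := (PySem.List.enumerate lines 0).foldl
    (fun (res : List (List Char)) p => res ++ [pvLineA lines p]) []
  String.ofList (PySem.Chars.join ['\n'] result)

-- ===== PORT B =====
-- loop body of B: backward pass; st = (nh, out); nh = index of nearest line at/after the current one
-- containing 'test_user.id' (lines.length if none); out collects the lines back-to-front
def pvStepB (n : Int) (st : Int × List (List Char)) (p : Int × List Char) : Int × List (List Char) :=
  let i := p.1
  let line := p.2
  let nh := if PySem.Chars.isIn "test_user.id".toList line then i else st.1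
  let line :=
    if PySem.Chars.isIn "def ".toList line && PySem.Chars.isIn "(db_session".toList line
        && !PySem.Chars.isIn "test_user".toList line
        && decide (nh < n) && decide (nh < i + 20) then
      PySem.Chars.replace
        (PySem.Chars.replace line "(db_session)".toList "(db_session, test_user)".toList)
        "(db_session,".toList "(db_session, test_user,".toList
    else line
  (nh, st.2 ++ [line])

def add_test_user_to_params_alt (content : String) : String :=
  let lines := PySem.Chars.splitOn content.toList ['\n']
  let n : Int := lines.length
  let st := ((PySem.List.enumerate lines 0).reverse).foldl (pvStepB n) (n, [])
  String.ofList (PySem.Chars.join ['\n'] st.2.reverse)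

-- ===== PRECONDITION & SPEC =====
def Spec_add_test_user_to_params (content : String) (out : String) : Prop := out = add_test_user_to_params_alt content
instance (content : String) (out : String) : Decidable (Spec_add_test_user_to_params content out) := by unfold Spec_add_test_user_to_params; infer_instance

-- ===== CLAIM (what is proved, stated in full; the proofs are below) =====
def Claim_equal_add_test_user_to_params : Prop := ∀ (content : String), Dom_add_test_user_to_params content → Spec_add_test_user_to_params content (add_test_user_to_params content)

-- ===== LEMMAS AND PROOFS =====

def pvHit (l : List Char) : Bool := PySem.Chars.isIn "test_user.id".toList l

def pvCand (l : List Char) : Bool :=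
  PySem.Chars.isIn "def ".toList l && PySem.Chars.isIn "(db_session".toList l
    && !PySem.Chars.isIn "test_user".toList l

def pvFix (l : List Char) : List Char :=
  PySem.Chars.replace
    (PySem.Chars.replace l "(db_session)".toList "(db_session, test_user)".toList)
    "(db_session,".toList "(db_session, test_user,".toList

-- nearest index ≥ k of a line containing 'test_user.id'; lines.length if none
def pvNH (lines : List (List Char)) (k : Nat) : Nat := k + (lines.drop k).findIdx pvHit

-- the window test of A, in closed form
def pvW (lines : List (List Char)) (k : Nat) : Bool :=
  decide (pvNH lines k < min (k + 20) lines.length)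

def pvGP (lines : List (List Char)) (p : Int × List Char) : List Char :=
  if pvCand p.2 && pvW lines p.1.toNat then pvFix p.2 else p.2

lemma pv_prefix_of_prefix_append_cons {pat u v : List Char} {c : Char} (h : c ∉ pat)
    (hp : pat <+: u ++ c :: v) : pat <+: u := by
  obtain ⟨r, hr⟩ := hp
  by_cases hl : pat.length ≤ u.length
  · have hpat : pat = (u ++ c :: v).take pat.length := by
      rw [← hr, List.take_append, List.take_of_length_le (le_refl _)]
      simp
    rw [List.take_append, Nat.sub_eq_zero_of_le hl] at hpat
    rw [List.take_zero, List.append_nil] at hpat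
    exact hpat ▸ List.take_prefix _ _
  · exfalso
    apply h
    have hq := congrArg (fun l => l[u.length]?) hr
    simp only at hq
    rw [List.getElem?_append_left (by omega)] at hq
    rw [List.getElem?_append_right (le_refl _)] at hq
    simp only [Nat.sub_self, List.getElem?_cons_zero] at hq
    rw [List.getElem?_eq_getElem (by omega)] at hq
    have : pat[u.length] = c := by injection hq
    exact this ▸ List.getElem_mem _

-- a pattern avoiding c is an infix of a ++ c :: b iff it is an infix of a part
lemma pv_infix_append_cons {pat b : List Char} {c : Char} (h : c ∉ pat) (a : List Char) :
    pat <:+: a ++ c :: b ↔ pat <:+: a ∨ pat <:+: b := by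
  induction a with
  | nil =>
    simp only [List.nil_append]
    rw [List.infix_cons_iff]
    constructor
    · rintro (hp | hi)
      · match pat, hp with
        | [], _ => exact Or.inl List.nil_infix
        | x :: xs, hp =>
          obtain ⟨r, hr⟩ := hp
          exfalso
          apply h
          have : x = c := by injection hr
          simp [this]
      · exact Or.inr hi
    · rintro (h1 | h2)
      · have hz : pat = [] := List.length_eq_zero_iff.mp (by simpa using h1.length_le)
        exact Or.inl (hz ▸ List.nil_prefix)
      · exact Or.inr h2
  | cons x a' ih =>
    simp only [List.cons_append]
    rw [List.infix_cons_iff, List.infix_cons_iff (l₁ := pat) (a := x) (l₂ := a')]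
    constructor
    · rintro (hp | hi)
      · exact Or.inl (Or.inl (pv_prefix_of_prefix_append_cons h (by simpa using hp)))
      · rcases ih.mp hi with ha | hb
        · exact Or.inl (Or.inr ha)
        · exact Or.inr hb
    · rintro ((hp | hi) | hb)
      · exact Or.inl (by simpa using hp.trans (List.prefix_append (x :: a') (c :: b)))
      · exact Or.inr (ih.mpr (Or.inl hi))
      · exact Or.inr (ih.mpr (Or.inr hb))

-- the pattern occurs in '\n'.join(pieces) iff it occurs in some piece
lemma pv_infix_join {pat : List Char} (pieces : List (List Char)) (hne : pat ≠ [])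
    (h : '\n' ∉ pat) :
    pat <:+: PySem.Chars.join ['\n'] pieces ↔ ∃ p ∈ pieces, pat <:+: p := by
  induction pieces with
  | nil =>
    rw [PySem.Chars.join_nil]
    simp only [List.not_mem_nil, false_and, exists_const, iff_false]
    intro hi
    exact hne (List.length_eq_zero_iff.mp (by simpa using hi.length_le))
  | cons p rest ih =>
    match rest with
    | [] => rw [PySem.Chars.join_singleton]; simp
    | q :: rest' =>
      rw [PySem.Chars.join_cons_cons]
      have : p ++ ['\n'] ++ PySem.Chars.join ['\n'] (q :: rest')
           = p ++ '\n' :: PySem.Chars.join ['\n'] (q :: rest') := by simp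
      rw [this, pv_infix_append_cons h, ih]
      simp

-- a predicate holds somewhere on the first m elements iff findIdx lands before m
lemma pv_exists_take_iff_findIdx {α : Type} (d : List α) (p : α → Bool) (m : Nat)
    (hm : m ≤ d.length) : (∃ x ∈ d.take m, p x = true) ↔ d.findIdx p < m := by
  constructor
  · rintro ⟨x, hx, hpx⟩
    obtain ⟨j, hj, rfl⟩ := List.mem_iff_getElem.1 hx
    have hjm : j < m := by simp at hj; omega
    have hjd : j < d.length := lt_of_lt_of_le hjm hm
    rw [List.getElem_take] at hpx
    by_contra hlt
    rw [not_lt] at hlt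
    have hf := List.not_of_lt_findIdx (xs := d) (i := j) (lt_of_lt_of_le hjm hlt)
    exact (ne_true_of_eq_false hf) hpx
  · intro h
    have hlen : d.findIdx p < d.length := lt_of_lt_of_le h hm
    refine ⟨d[d.findIdx p], ?_, List.findIdx_getElem (w := hlen)⟩
    refine List.mem_take_iff_getElem.2 ⟨d.findIdx p, ?_, rfl⟩
    omega

lemma pv_nh_succ (lines : List (List Char)) (k : Nat) (hk : k < lines.length) :
    (pvNH lines k : Int) = if pvHit lines[k] then (k : Int) else (pvNH lines (k+1) : Int) := by
  unfold pvNH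
  rw [List.drop_eq_getElem_cons hk, List.findIdx_cons]
  cases pvHit lines[k]
  · simp only [cond_false, Bool.false_eq_true, if_false]
    push_cast
    ring
  · simp

lemma pv_nh_cond (lines : List (List Char)) (k : Nat) :
    (decide ((pvNH lines k : Int) < (lines.length : Int)) &&
     decide ((pvNH lines k : Int) < (k : Int) + 20)) = pvW lines k := by
  rw [Bool.eq_iff_iff]
  simp only [pvW, Bool.and_eq_true, decide_eq_true_eq]
  omega

-- A's joined-window test equals the closed-form window test
lemma pv_window_iff (lines : List (List Char)) (k : Nat) :
    PySem.Chars.isIn "test_user.id".toList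
      (PySem.Chars.join ['\n']
        (PySem.List.slice lines (some (k : Int)) (some (min ((k : Int) + 20) (lines.length : Int)))))
    = pvW lines k := by
  have hcast : min ((k : Int) + 20) ((lines.length : Nat) : Int)
      = ((min (k + 20) lines.length : Nat) : Int) := by push_cast; rfl
  rw [hcast, PySem.List.slice_natCast]
  rw [Bool.eq_iff_iff]
  rw [PySem.Chars.isIn_iff_infix]
  rw [pv_infix_join _ (by decide) (by decide)]
  have hiff : (∃ p ∈ (lines.drop k).take (min (k + 20) lines.length - k),
      "test_user.id".toList <:+: p)
      ↔ ∃ p ∈ (lines.drop k).take (min (k + 20) lines.length - k), pvHit p = true := by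
    constructor <;> rintro ⟨p, hp, hh⟩ <;>
      exact ⟨p, hp, by simpa [pvHit, PySem.Chars.isIn_iff_infix] using hh⟩
  rw [hiff, pv_exists_take_iff_findIdx _ _ _ (by rw [List.length_drop]; omega)]
  simp only [pvW, pvNH, decide_eq_true_eq]
  omega

lemma pv_lineA_eq (lines : List (List Char)) (k : Nat) (hk : k < lines.length) :
    pvLineA lines ((k : Int), lines[k]) = pvGP lines ((k : Int), lines[k]) := by
  have hw := pv_window_iff lines k
  simp only [pvLineA, pvGP, pvCand, pvFix, Int.toNat_natCast]
  rw [hw]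
  cases hc : PySem.Chars.isIn "def ".toList lines[k] &&
      PySem.Chars.isIn "(db_session".toList lines[k] &&
      !PySem.Chars.isIn "test_user".toList lines[k] <;>
    cases hv : pvW lines k <;> simp_all

-- one backward step of B moves pvNH from k+1 to k and emits line k
lemma pv_step_eq (lines : List (List Char)) (k : Nat) (hk : k < lines.length)
    (acc : List (List Char)) :
    pvStepB (lines.length : Int) ((pvNH lines (k+1) : Int), acc) ((k : Int), lines[k])
      = ((pvNH lines k : Int), acc ++ [pvGP lines ((k : Int), lines[k])]) := by
  have hnh : (if PySem.Chars.isIn "test_user.id".toList lines[k] then (k : Int)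
      else (pvNH lines (k+1) : Int)) = (pvNH lines k : Int) := by
    rw [pv_nh_succ lines k hk]; simp [pvHit]
  simp only [pvStepB, hnh]
  have hcond : (PySem.Chars.isIn "def ".toList lines[k] &&
      PySem.Chars.isIn "(db_session".toList lines[k] &&
      !PySem.Chars.isIn "test_user".toList lines[k] &&
      decide ((pvNH lines k : Int) < (lines.length : Int)) &&
      decide ((pvNH lines k : Int) < (k : Int) + 20))
      = (pvCand lines[k] && pvW lines k) := by
    rw [Bool.and_assoc (c := decide ((pvNH lines k : Int) < (k : Int) + 20))]
    rw [pv_nh_cond]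
    rfl
  rw [hcond]
  simp only [pvGP, pvCand, pvFix, Int.toNat_natCast]
  rfl

-- the backward loop of B computes pvNH 0 and the mapped lines, back-to-front
lemma pv_bloop (lines : List (List Char)) (k : Nat) (hk : k ≤ lines.length)
    (acc : List (List Char)) :
    (((PySem.List.enumerate lines 0).take k).reverse).foldl (pvStepB (lines.length : Int))
        ((pvNH lines k : Int), acc)
      = ((pvNH lines 0 : Int),
         acc ++ (((PySem.List.enumerate lines 0).take k).map (pvGP lines)).reverse) := by
  induction k generalizing acc with
  | zero => simp
  | succ k ih =>
    have hke : k < (PySem.List.enumerate lines 0).length := by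
      rw [PySem.List.length_enumerate]; omega
    have hkl : k < lines.length := by omega
    have htake : (PySem.List.enumerate lines 0).take (k+1)
        = (PySem.List.enumerate lines 0).take k ++ [(PySem.List.enumerate lines 0)[k]] := by
      rw [List.take_add_one, List.getElem?_eq_getElem hke]
      rfl
    rw [htake, List.reverse_append, List.reverse_singleton, List.singleton_append,
        List.foldl_cons]
    rw [PySem.List.getElem_enumerate (h := hke), zero_add]
    rw [pv_step_eq lines k hkl acc]
    rw [ih (by omega)]
    rw [List.map_append, List.reverse_append]
    simp

lemma pv_nh_len (lines : List (List Char)) : pvNH lines lines.length = lines.length := by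
  simp [pvNH, List.drop_length]

-- ===== VERDICT (by name: the statement is the Claim_ definition above) =====
theorem add_test_user_to_params_spec : Claim_equal_add_test_user_to_params := by
  intro content _
  show add_test_user_to_params content = add_test_user_to_params_alt content
  unfold add_test_user_to_params add_test_user_to_params_alt
  simp only []
  set lines := PySem.Chars.splitOn content.toList ['\n'] with hlines
  have hA : (PySem.List.enumerate lines 0).foldl
      (fun (res : List (List Char)) p => res ++ [pvLineA lines p]) []
      = (PySem.List.enumerate lines 0).map (pvLineA lines) := by
    simpa using PySem.List.foldl_append_singleton_eq_map (f := pvLineA lines)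
      (l := PySem.List.enumerate lines 0) (acc := [])
  have hmap : (PySem.List.enumerate lines 0).map (pvLineA lines)
      = (PySem.List.enumerate lines 0).map (pvGP lines) := by
    apply List.map_congr_left
    intro p hp
    obtain ⟨j, hj, rfl⟩ := (PySem.List.mem_enumerate_iff _ _ _).1 hp
    rw [zero_add]
    exact pv_lineA_eq lines j hj
  have hto : (PySem.List.enumerate lines 0).reverse
      = ((PySem.List.enumerate lines 0).take lines.length).reverse := by
    rw [← PySem.List.length_enumerate lines 0, List.take_length]
  have hB := pv_bloop lines lines.length (le_refl _) []
  rw [pv_nh_len] at hB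
  rw [hA, hmap, hto, hB]
  simp only [List.nil_append, List.reverse_reverse]
  rw [show List.take lines.length (PySem.List.enumerate lines 0)
      = PySem.List.enumerate lines 0 by
    rw [← PySem.List.length_enumerate lines 0, List.take_length]]
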